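-- pv_equiv track=rewrite | github.com/PDL-project/Mega_PDL | AI2Thor/baselines/PDL_central/scripts/LP_Module.py | first_target_object_from_plan
-- ===== SOURCE A (Python) =====
-- from typing import Dict, List, Any, Tuple, Optional, Set
--
-- def _tok(action_line: str) -> List[str]:
--     # 액션 문장(예: pickupobject robot1 apple...)에서 괄호를 제거하고 단어 단위로 쪼개주는 보조 함수
--     return action_line.replace("(", " ").replace(")", " ").split()
--
-- def first_target_object_from_plan(plan_actions: List[str]) -> Optional[str]:
--     """
--     서브태스크 플랜에서 첫 번째로 이동해야 할 대상 오브젝트를 추출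
--     gotoobject가 있으면 그 대상, 없으면 첫 번째 액션의 대상 오브젝트 반환
--     """
--     for a in plan_actions:
--         parts = _tok(a)
--         if len(parts) >= 3 and parts[0].strip().lower() == "gotoobject":
--             return parts[2].strip().lower()
--     # gotoobject 없으면 첫 번째 액션의 대상
--     for a in plan_actions:
--         parts = _tok(a)
--         if len(parts) >= 3:
--             return parts[2].strip().lower()
--     return None
-- ===== SOURCE B (Python) =====
-- from typing import List, Optional
--
-- def _tok(action_line: str) -> List[str]:
--     return action_line.replace("(", " ").replace(")", " ").split()
--
-- def first_target_object_from_plan(plan_actions: List[str]) -> Optional[str]: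
--     fallback = None
--     for a in plan_actions:
--         parts = _tok(a)
--         if len(parts) >= 3:
--             target = parts[2].strip().lower()
--             if parts[0].strip().lower() == "gotoobject":
--                 return target
--             if fallback is None:
--                 fallback = target
--     return fallback
-- ===== Notes on version B (the rewrite author's own statement) =====
-- stated objective: simpler
-- what changed: A's two sequential scans (first for a gotoobject line, then for any >=3-token line) are collapsed into one pass that returns the first gotoobject target immediately and otherwise keeps the first >=3-token target in a 'fallback' accumulator returned at the end.
import Mathlib
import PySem

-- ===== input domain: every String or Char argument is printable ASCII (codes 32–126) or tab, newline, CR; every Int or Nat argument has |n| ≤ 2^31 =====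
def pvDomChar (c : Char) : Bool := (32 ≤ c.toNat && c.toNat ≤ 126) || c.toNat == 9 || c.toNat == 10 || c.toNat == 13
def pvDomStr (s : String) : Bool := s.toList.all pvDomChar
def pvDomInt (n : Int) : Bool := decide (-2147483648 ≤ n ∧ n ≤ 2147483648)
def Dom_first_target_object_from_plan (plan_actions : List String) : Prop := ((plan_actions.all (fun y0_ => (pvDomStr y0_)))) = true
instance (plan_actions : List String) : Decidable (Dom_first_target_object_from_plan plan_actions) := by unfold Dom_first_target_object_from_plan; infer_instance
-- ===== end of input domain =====

-- B collapses A's two sequential scans into one pass keeping a 'first valid fallback' accumulator; same O(n) cost, simpler.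

-- ===== PORT A =====
-- _tok: remove parentheses, split on whitespace
def pvTok (action_line : String) : List String :=
  PySem.Str.split₀ (PySem.Str.replace (PySem.Str.replace action_line "(" " ") ")" " ")

-- first loop of A: first line with ≥3 tokens whose head is "gotoobject"
def pvLoopA1 : List String → Option String
  | [] => none
  | a :: rest =>
    let parts := pvTok a
    if 3 ≤ parts.length ∧ PySem.Str.lower (PySem.Str.strip (parts.getD 0 "")) = "gotoobject" then
      some (PySem.Str.lower (PySem.Str.strip (parts.getD 2 "")))
    else pvLoopA1 rest

-- second loop of A: first line with ≥3 tokens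
def pvLoopA2 : List String → Option String
  | [] => none
  | a :: rest =>
    let parts := pvTok a
    if 3 ≤ parts.length then some (PySem.Str.lower (PySem.Str.strip (parts.getD 2 "")))
    else pvLoopA2 rest

def first_target_object_from_plan (plan_actions : List String) : Option String :=
  match pvLoopA1 plan_actions with
  | some t => some t
  | none => pvLoopA2 plan_actions

-- ===== PORT B =====
-- single pass with a fallback accumulator (Source B)
def pvLoopB : List String → Option String → Option String
  | [], fallback => fallback
  | a :: rest, fallback =>
    let parts := pvTok a
    if 3 ≤ parts.length then
      let target := PySem.Str.lower (PySem.Str.strip (parts.getD 2 ""))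
      if PySem.Str.lower (PySem.Str.strip (parts.getD 0 "")) = "gotoobject" then some target
      else pvLoopB rest (match fallback with | none => some target | some _ => fallback)
    else pvLoopB rest fallback

def first_target_object_from_plan_alt (plan_actions : List String) : Option String :=
  pvLoopB plan_actions none

-- ===== PRECONDITION & SPEC =====
def Spec_first_target_object_from_plan (plan_actions : List String) (out : Option String) : Prop := out = first_target_object_from_plan_alt plan_actions
instance (plan_actions : List String) (out : Option String) : Decidable (Spec_first_target_object_from_plan plan_actions out) := by unfold Spec_first_target_object_from_plan; infer_instance

-- ===== CLAIM (what is proved, stated in full; the proofs are below) =====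
def Claim_equal_first_target_object_from_plan : Prop := ∀ (plan_actions : List String), Dom_first_target_object_from_plan plan_actions → Spec_first_target_object_from_plan plan_actions (first_target_object_from_plan plan_actions)

-- ===== LEMMAS AND PROOFS =====
-- B's single pass equals: A's first scan, else the fallback accumulator joined with A's second scan.
theorem pvLoopB_eq (xs : List String) : ∀ (fb : Option String),
    pvLoopB xs fb = match pvLoopA1 xs with
      | some t => some t
      | none => fb.or (pvLoopA2 xs) := by
  induction xs with
  | nil => intro fb; cases fb <;> simp [pvLoopB, pvLoopA1, pvLoopA2, Option.or]
  | cons a rest ih =>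
    intro fb
    simp only [pvLoopB, pvLoopA1, pvLoopA2]
    by_cases h3 : 3 ≤ (pvTok a).length
    · simp only [h3, if_true, true_and]
      by_cases hg : PySem.Str.lower (PySem.Str.strip ((pvTok a).getD 0 "")) = "gotoobject"
      · rw [if_pos hg, if_pos hg]
      · rw [if_neg hg, if_neg hg, ih]
        cases pvLoopA1 rest <;> cases fb <;> simp [Option.or]
    · rw [if_neg h3, if_neg (by simp [h3] : ¬ (3 ≤ (pvTok a).length ∧ PySem.Str.lower (PySem.Str.strip ((pvTok a).getD 0 "")) = "gotoobject")), if_neg h3]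
      exact ih fb

-- ===== VERDICT (by name: the statement is the Claim_ definition above) =====
theorem first_target_object_from_plan_spec : Claim_equal_first_target_object_from_plan := by
  intro xs _
  unfold Spec_first_target_object_from_plan first_target_object_from_plan first_target_object_from_plan_alt
  rw [pvLoopB_eq]
  cases pvLoopA1 xs <;> simp [Option.or]
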